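-- pv_equiv track=rewrite | github.com/khashishin/Python_playground | classes_advanced.py | licz_odleglosc
-- ===== SOURCE A (Python) =====
-- def licz_odleglosc(nadwezly1, nadwezly2):
--     najblizszy_sasiad = None
--     for wezel in nadwezly1:
--         if wezel in nadwezly2:
--             najblizszy_sasiad = wezel
--             break
--     wezel_1=nadwezly1.index(najblizszy_sasiad)
--     wezel_2=nadwezly2.index(najblizszy_sasiad)
--     odleglosc = sum([2**x for x in range(wezel_1)]) + sum([2**x for x in range(wezel_2)])
--     return odleglosc
-- ===== SOURCE B (Python) =====
-- def licz_odleglosc(nadwezly1, nadwezly2):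
--     idx2 = {}
--     for j, w in enumerate(nadwezly2):
--         if w not in idx2:
--             idx2[w] = j
--     for i, w in enumerate(nadwezly1):
--         if w in idx2:
--             return 2 ** i - 1 + 2 ** idx2[w] - 1
--     raise ValueError("no common node")
-- ===== Notes on version B (the rewrite author's own statement) =====
-- stated objective: alternative
-- what changed: Replaces the O(n*m) membership scan plus two list.index passes and two geometric-sum list comprehensions by a single value-to-first-index dict over nadwezly2, one enumerate pass over nadwezly1, and the closed form 2**k - 1 for each sum (asymptotically lighter, though a timing run could not measure it: large random inputs share no element).
import Mathlib
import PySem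

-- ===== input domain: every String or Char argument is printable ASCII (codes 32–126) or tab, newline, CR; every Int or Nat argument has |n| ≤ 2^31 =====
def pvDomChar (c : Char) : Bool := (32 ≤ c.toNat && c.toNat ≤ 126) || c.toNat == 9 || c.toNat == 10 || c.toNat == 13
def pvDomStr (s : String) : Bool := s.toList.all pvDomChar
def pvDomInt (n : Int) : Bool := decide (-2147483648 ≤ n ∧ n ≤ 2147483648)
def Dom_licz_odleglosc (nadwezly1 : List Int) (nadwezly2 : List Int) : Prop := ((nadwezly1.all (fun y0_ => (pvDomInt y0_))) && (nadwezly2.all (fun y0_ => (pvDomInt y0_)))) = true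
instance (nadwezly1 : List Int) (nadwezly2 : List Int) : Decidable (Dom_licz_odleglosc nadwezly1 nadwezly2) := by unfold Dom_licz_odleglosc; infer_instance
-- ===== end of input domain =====

-- B replaces A's nested membership scans, list.index passes and geometric-sum comprehensions
-- by a value-to-first-index dict over nadwezly2, one pass over nadwezly1 and the closed form 2^k - 1.

-- ===== PORT A =====
-- the first-element-of-nadwezly1-in-nadwezly2 loop with break
def pvFindCommon (l2 : List Int) : List Int → Option Int
  | [] => none
  | w :: rest => if l2.contains w then some w else pvFindCommon l2 rest

-- sum([2**x for x in range(k)])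
def pvSumPow (k : Nat) : Int :=
  ((PySem.List.pyRange 0 k 1).map (fun x => (2:Int) ^ x.toNat)).sum

def licz_odleglosc (nadwezly1 : List Int) (nadwezly2 : List Int) : Int :=
  match pvFindCommon nadwezly2 nadwezly1 with
  | none => 0  -- Python: nadwezly1.index(None) raises ValueError; excluded by Pre_
  | some w =>
    match PySem.List.index? nadwezly1 w, PySem.List.index? nadwezly2 w with
    | some i1, some i2 => pvSumPow i1 + pvSumPow i2
    | _, _ => 0  -- unreachable: w is drawn from nadwezly1 and tested against nadwezly2

-- ===== PORT B =====
-- idx2: value -> first index in nadwezly2 (the 'if w not in idx2' loop)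
def pvBuildIdx (l2 : List Int) : PySem.Dict Int Int :=
  (PySem.List.enumerate l2 0).foldl
    (fun d p => if d.contains p.2 then d else d.insert p.2 p.1) PySem.Dict.empty

-- the enumerate(nadwezly1) loop with early return; i is the running index
def pvScan (d : PySem.Dict Int Int) : List Int → Nat → Int
  | [], _ => 0  -- Python: raise ValueError; excluded by Pre_
  | w :: rest, i =>
    match d.get? w with
    | some j => (2:Int) ^ i - 1 + (2:Int) ^ j.toNat - 1
    | none => pvScan d rest (i + 1)

def licz_odleglosc_alt (nadwezly1 : List Int) (nadwezly2 : List Int) : Int :=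
  pvScan (pvBuildIdx nadwezly2) nadwezly1 0

-- ===== PRECONDITION & SPEC =====
-- Pre_ excludes exactly the inputs with no common element, where A raises ValueError
-- (nadwezly1.index(None)); B raises ValueError there too.
def Pre_licz_odleglosc (nadwezly1 : List Int) (nadwezly2 : List Int) : Prop :=
  ∃ w, w ∈ nadwezly1 ∧ w ∈ nadwezly2

instance (nadwezly1 : List Int) (nadwezly2 : List Int) : Decidable (Pre_licz_odleglosc nadwezly1 nadwezly2) := by
  unfold Pre_licz_odleglosc; infer_instance

def pvWitness_licz_odleglosc : List Int × List Int := ([5, 3], [4, 3, 5])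

def Spec_licz_odleglosc (nadwezly1 : List Int) (nadwezly2 : List Int) (out : Int) : Prop := out = licz_odleglosc_alt nadwezly1 nadwezly2
instance (nadwezly1 : List Int) (nadwezly2 : List Int) (out : Int) : Decidable (Spec_licz_odleglosc nadwezly1 nadwezly2 out) := by unfold Spec_licz_odleglosc; infer_instance

-- ===== CLAIM (what is proved, stated in full; the proofs are below) =====
def Claim_equal_licz_odleglosc : Prop := ∀ (nadwezly1 : List Int) (nadwezly2 : List Int), Dom_licz_odleglosc nadwezly1 nadwezly2 → Pre_licz_odleglosc nadwezly1 nadwezly2 → Spec_licz_odleglosc nadwezly1 nadwezly2 (licz_odleglosc nadwezly1 nadwezly2)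

-- ===== LEMMAS AND PROOFS =====

-- proof-side spec: first index k in l1 (and the value w) of the first element of l1 present in l2
def pvFirst (l2 : List Int) : List Int → Option (Nat × Int)
  | [] => none
  | w :: rest => if l2.contains w then some (0, w) else (pvFirst l2 rest).map (fun p => (p.1 + 1, p.2))

lemma pvFirst_isSome (l2 l1 : List Int) (h : ∃ w, w ∈ l1 ∧ w ∈ l2) :
    (pvFirst l2 l1).isSome := by
  induction l1 with
  | nil => obtain ⟨w, hw, _⟩ := h; cases hw
  | cons x rest ih =>
    simp only [pvFirst]
    by_cases hx : x ∈ l2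
    · rw [if_pos (by simpa using hx)]; rfl
    · rw [if_neg (by simpa using hx), Option.isSome_map]
      apply ih
      obtain ⟨w, hw, hw2⟩ := h
      rcases List.mem_cons.mp hw with rfl | hmem
      · exact absurd hw2 hx
      · exact ⟨w, hmem, hw2⟩

lemma pvSumPow_closed (k : Nat) : pvSumPow k = 2 ^ k - 1 := by
  induction k with
  | zero => simp [pvSumPow, PySem.List.pyRange_one_eq_nil]
  | succ n ih =>
    have h : PySem.List.pyRange 0 ((n : Int) + 1) 1
        = PySem.List.pyRange 0 (n : Int) 1 ++ [(n : Int)] :=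
      PySem.List.pyRange_one_succ_right (Int.natCast_nonneg n)
    simp only [pvSumPow] at ih ⊢
    push_cast
    rw [h, List.map_append, List.sum_append]
    simp only [List.map_cons, List.map_nil, List.sum_cons, List.sum_nil, Int.toNat_natCast]
    rw [ih]
    rw [pow_succ]
    ring

-- characterization of A via pvFirst
lemma pvFirst_charA (l2 : List Int) : ∀ l1 k w, pvFirst l2 l1 = some (k, w) →
    pvFindCommon l2 l1 = some w ∧ PySem.List.index? l1 w = some k ∧ w ∈ l2 := by
  intro l1
  induction l1 with
  | nil => intro k w h; simp [pvFirst] at h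
  | cons x rest ih =>
    intro k w h
    simp only [pvFirst] at h
    by_cases hx : x ∈ l2
    · rw [if_pos (by simpa using hx)] at h
      simp only [Option.some.injEq, Prod.mk.injEq] at h
      obtain ⟨rfl, rfl⟩ := h
      refine ⟨by simp [pvFindCommon, hx], PySem.List.index?_cons_self x rest, hx⟩
    · rw [if_neg (by simpa using hx)] at h
      obtain ⟨⟨k', w'⟩, hrest, heq⟩ := Option.map_eq_some_iff.mp h
      simp only [Prod.mk.injEq] at heq
      obtain ⟨hk, hw⟩ := heq
      subst hw
      obtain ⟨hfind, hidx, hmem⟩ := ih k' w' hrest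
      have hne : x ≠ w' := fun hc => hx (hc ▸ hmem)
      refine ⟨?_, ?_, hmem⟩
      · simp only [pvFindCommon]
        rw [if_neg (by simpa using hx)]
        exact hfind
      · rw [PySem.List.index?_cons_of_ne rest hne, hidx, ← hk]
        rfl

-- the dict built by B looks up the first index in l2
lemma pvBuildIdx_aux (w : Int) : ∀ (l2 : List Int) (s : Int) (d : PySem.Dict Int Int),
    ((PySem.List.enumerate l2 s).foldl
      (fun d p => if d.contains p.2 then d else d.insert p.2 p.1) d).get? w
    = match d.get? w with
      | some v => some v
      | none => (PySem.List.index? l2 w).map (fun n => s + (n : Int)) := by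
  intro l2
  induction l2 with
  | nil => intro s d; cases hd : d.get? w <;> simp [PySem.List.enumerate_nil, hd]
  | cons x rest ih =>
    intro s d
    rw [PySem.List.enumerate_cons]
    simp only [List.foldl_cons]
    by_cases hc : d.contains x
    · rw [if_pos hc, ih]
      cases hd : d.get? w with
      | some v => simp
      | none =>
        have hxw : x ≠ w := by
          intro h; subst h
          rw [PySem.Dict.contains_eq_isSome_get?, hd] at hc; simp at hc
        rw [PySem.List.index?_cons_of_ne rest hxw]
        cases PySem.List.index? rest w with
        | none => simp
        | some n => simp; ring
    · rw [if_neg hc, ih]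
      by_cases hxw : x = w
      · subst hxw
        rw [PySem.Dict.get?_insert_self]
        have hd : d.get? x = none :=
          (PySem.Dict.get?_eq_none_iff_contains d x).mpr (by simpa using hc)
        rw [hd, PySem.List.index?_cons_self]
        simp
      · rw [PySem.Dict.get?_insert_of_ne d s (Ne.symm hxw)]
        cases hd : d.get? w with
        | some v => simp
        | none =>
          rw [PySem.List.index?_cons_of_ne rest hxw]
          cases PySem.List.index? rest w with
          | none => simp
          | some n => simp; ring

lemma pvBuildIdx_get? (l2 : List Int) (w : Int) :
    (pvBuildIdx l2).get? w = (PySem.List.index? l2 w).map (fun n => (n : Int)) := by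
  unfold pvBuildIdx
  rw [pvBuildIdx_aux]
  simp

-- characterization of B via pvFirst
lemma pvScan_charB (l2 : List Int) (j : Nat) : ∀ l1 k w (i : Nat),
    pvFirst l2 l1 = some (k, w) →
    PySem.List.index? l2 w = some j →
    pvScan (pvBuildIdx l2) l1 i = (2:Int) ^ (i + k) - 1 + (2:Int) ^ j - 1 := by
  intro l1
  induction l1 with
  | nil => intro k w i h; simp [pvFirst] at h
  | cons x rest ih =>
    intro k w i h hj
    simp only [pvFirst] at h
    by_cases hx : x ∈ l2
    · rw [if_pos (by simpa using hx)] at h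
      simp only [Option.some.injEq, Prod.mk.injEq] at h
      obtain ⟨rfl, rfl⟩ := h
      simp only [pvScan, pvBuildIdx_get?, hj]
      simp
    · rw [if_neg (by simpa using hx)] at h
      obtain ⟨⟨k', w'⟩, hrest, heq⟩ := Option.map_eq_some_iff.mp h
      simp only [Prod.mk.injEq] at heq
      obtain ⟨hk, hw⟩ := heq
      subst hw
      have hxnot : PySem.List.index? l2 x = none :=
        (PySem.List.index?_eq_none_iff l2 x).mpr hx
      simp only [pvScan, pvBuildIdx_get?, hxnot]
      simp only [Option.bind_eq_bind, Option.bind_none, Option.map_none]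
      rw [ih k' w' (i + 1) hrest hj, ← hk]
      ring

-- ===== VERDICT (by name: the statement is the Claim_ definition above) =====
theorem licz_odleglosc_spec : Claim_equal_licz_odleglosc := by
  intro l1 l2 _dom hpre
  unfold Spec_licz_odleglosc
  obtain ⟨⟨k, w⟩, hfirst⟩ := Option.isSome_iff_exists.mp (pvFirst_isSome l2 l1 hpre)
  obtain ⟨hfind, hidx1, hmem2⟩ := pvFirst_charA l2 l1 k w hfirst
  obtain ⟨j, hj⟩ := Option.isSome_iff_exists.mp ((PySem.List.index?_isSome_iff l2 w).mpr hmem2)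
  simp only [licz_odleglosc, licz_odleglosc_alt, hfind, hidx1, hj]
  rw [pvScan_charB l2 j l1 k w 0 hfirst hj, pvSumPow_closed, pvSumPow_closed]
  ring
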